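-- pv_equiv track=rewrite | github.com/la-moss/KubeClaw | agent/facts.py | _incident_signal_counts
-- ===== SOURCE A (Python) =====
-- INCIDENT_TYPES = ("crashloop", "imagepull", "pending", "service_unreachable", "oom", "generic")
--
-- CRASHLOOP_PATTERNS = ("back-off", "crashloopbackoff", "database_url")
--
-- IMAGEPULL_PATTERNS = ("failed to pull image", "imagepull", "does-not-exist", "errimagepull")
--
-- PENDING_PATTERNS = ("failedscheduling", "insufficient cpu", "pending", "resourcequota")
--
-- SERVICE_PATTERNS = ("endpoints", "selector", "subsets: []", "service unreachable", "500")
--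
-- OOM_PATTERNS = ("oomkilled", "exit code: 137", "readiness probe failed", "memory")
--
-- def _matches_any(line: str, patterns: tuple[str, ...]) -> bool:
--     lowered = line.lower()
--     return any(pattern in lowered for pattern in patterns)
--
-- def _incident_signal_counts(lines: list[str]) -> dict[str, int]:
--     counts = {name: 0 for name in INCIDENT_TYPES}
--     for line in lines:
--         lowered = line.lower()
--         if _matches_any(lowered, CRASHLOOP_PATTERNS):
--             counts["crashloop"] += 1
--         if _matches_any(lowered, IMAGEPULL_PATTERNS):
--             counts["imagepull"] += 1
--         if _matches_any(lowered, PENDING_PATTERNS):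
--             counts["pending"] += 1
--         if _matches_any(lowered, SERVICE_PATTERNS):
--             counts["service_unreachable"] += 1
--         if _matches_any(lowered, OOM_PATTERNS):
--             counts["oom"] += 1
--     return counts
-- ===== SOURCE B (Python) =====
-- INCIDENT_TYPES = ("crashloop", "imagepull", "pending", "service_unreachable", "oom", "generic")
--
-- CRASHLOOP_PATTERNS = ("back-off", "crashloopbackoff", "database_url")
--
-- IMAGEPULL_PATTERNS = ("failed to pull image", "imagepull", "does-not-exist", "errimagepull")
--
-- PENDING_PATTERNS = ("failedscheduling", "insufficient cpu", "pending", "resourcequota")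
--
-- SERVICE_PATTERNS = ("endpoints", "selector", "subsets: []", "service unreachable", "500")
--
-- OOM_PATTERNS = ("oomkilled", "exit code: 137", "readiness probe failed", "memory")
--
-- _CATEGORY_PATTERNS = {
--     "crashloop": CRASHLOOP_PATTERNS,
--     "imagepull": IMAGEPULL_PATTERNS,
--     "pending": PENDING_PATTERNS,
--     "service_unreachable": SERVICE_PATTERNS,
--     "oom": OOM_PATTERNS,
--     "generic": (),
-- }
--
--
-- def _incident_signal_counts(lines: list[str]) -> dict[str, int]:
--     lowered = [line.lower() for line in lines]
--     return {
--         name: sum(1 for text in lowered if any(p in text for p in pats))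
--         for name, pats in _CATEGORY_PATTERNS.items()
--     }
-- ===== Notes on version B (the rewrite author's own statement) =====
-- stated objective: simpler
-- what changed: Replaces the stateful single-pass loop with five counts[...] += 1 updates and a helper that re-lowers each line by a static category-to-patterns table and a dict comprehension counting matches per category over a once-lowered line list (generic falls out as 0 from its empty pattern tuple).
import Mathlib
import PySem

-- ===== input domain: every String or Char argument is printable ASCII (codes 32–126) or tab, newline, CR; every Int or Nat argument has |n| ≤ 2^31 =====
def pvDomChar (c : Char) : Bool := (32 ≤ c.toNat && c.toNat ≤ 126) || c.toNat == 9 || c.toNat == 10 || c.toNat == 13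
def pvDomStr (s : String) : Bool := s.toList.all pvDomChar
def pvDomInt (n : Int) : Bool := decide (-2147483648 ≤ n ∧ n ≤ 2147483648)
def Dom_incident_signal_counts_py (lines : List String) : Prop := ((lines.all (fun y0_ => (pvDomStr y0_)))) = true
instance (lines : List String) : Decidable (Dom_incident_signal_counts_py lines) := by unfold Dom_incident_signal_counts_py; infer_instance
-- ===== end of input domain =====

-- B replaces A's stateful single-pass loop (five in-place dict increments per line) by a
-- category→patterns table and a per-category count over a once-lowered line list (simpler).


-- ===== PORT A =====
def pvIncidentTypes : List String := ["crashloop", "imagepull", "pending", "service_unreachable", "oom", "generic"]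
def pvCrashloopPatterns : List String := ["back-off", "crashloopbackoff", "database_url"]
def pvImagepullPatterns : List String := ["failed to pull image", "imagepull", "does-not-exist", "errimagepull"]
def pvPendingPatterns : List String := ["failedscheduling", "insufficient cpu", "pending", "resourcequota"]
def pvServicePatterns : List String := ["endpoints", "selector", "subsets: []", "service unreachable", "500"]
def pvOomPatterns : List String := ["oomkilled", "exit code: 137", "readiness probe failed", "memory"]

def matchesAny (line : String) (patterns : List String) : Bool :=
  let lowered := PySem.Str.lower line
  patterns.any (fun pattern => PySem.Str.isIn pattern lowered)

def incidentStep (counts : PySem.Dict String Int) (line : String) : PySem.Dict String Int :=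
  let lowered := PySem.Str.lower line
  let counts := if matchesAny lowered pvCrashloopPatterns then counts.modify "crashloop" 0 (· + 1) else counts
  let counts := if matchesAny lowered pvImagepullPatterns then counts.modify "imagepull" 0 (· + 1) else counts
  let counts := if matchesAny lowered pvPendingPatterns then counts.modify "pending" 0 (· + 1) else counts
  let counts := if matchesAny lowered pvServicePatterns then counts.modify "service_unreachable" 0 (· + 1) else counts
  let counts := if matchesAny lowered pvOomPatterns then counts.modify "oom" 0 (· + 1) else counts
  counts

def incident_signal_counts_py (lines : List String) : List (String × Int) :=
  let counts : PySem.Dict String Int :=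
    pvIncidentTypes.foldl (fun d name => d.insert name 0) PySem.Dict.empty
  (lines.foldl incidentStep counts).items

-- ===== PORT B =====
def pvCategoryPatterns : List (String × List String) :=
  [("crashloop", pvCrashloopPatterns), ("imagepull", pvImagepullPatterns),
   ("pending", pvPendingPatterns), ("service_unreachable", pvServicePatterns),
   ("oom", pvOomPatterns), ("generic", [])]

def incident_signal_counts_py_alt (lines : List String) : List (String × Int) :=
  let lowered := lines.map PySem.Str.lower
  pvCategoryPatterns.map (fun p =>
    (p.1, (lowered.countP (fun text => p.2.any (fun q => PySem.Str.isIn q text)) : Int)))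

-- ===== PRECONDITION & SPEC =====
def Spec_incident_signal_counts_py (lines : List String) (out : List (String × Int)) : Prop := out = incident_signal_counts_py_alt lines
instance (lines : List String) (out : List (String × Int)) : Decidable (Spec_incident_signal_counts_py lines out) := by unfold Spec_incident_signal_counts_py; infer_instance

-- ===== CLAIM (what is proved, stated in full; the proofs are below) =====
def Claim_equal_incident_signal_counts_py : Prop := ∀ (lines : List String), Dom_incident_signal_counts_py lines → Spec_incident_signal_counts_py lines (incident_signal_counts_py lines)

-- ===== LEMMAS AND PROOFS =====

theorem lowerChar_idem (c : Char) :
    PySem.Chars.lowerChar (PySem.Chars.lowerChar c) = PySem.Chars.lowerChar c := by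
  unfold PySem.Chars.lowerChar PySem.Chars.isupper
  split_ifs with h1 h2 <;> try rfl
  exfalso
  simp only [Bool.and_eq_true, decide_eq_true_eq, Char.le_def, UInt32.le_iff_toNat_le] at h1 h2
  have hA : ('A' : Char).val.toNat = 65 := rfl
  have hZ : ('Z' : Char).val.toNat = 90 := rfl
  rw [hA, hZ] at h1 h2
  have hc : ∀ d : Char, d.val.toNat = d.toNat := fun _ => rfl
  rw [hc] at h1 h2
  have : (Char.ofNat (c.toNat + 32)).toNat = c.toNat + 32 := by
    rw [Char.toNat_ofNat, if_pos]
    unfold Nat.isValidChar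
    omega
  rw [this] at h2
  omega

theorem lower_idem (s : String) :
    PySem.Str.lower (PySem.Str.lower s) = PySem.Str.lower s := by
  unfold PySem.Str.lower PySem.Chars.lower
  simp [List.map_map, Function.comp_def, lowerChar_idem]

-- A's test on the already-lowered line, without the inner re-lowering.
def catPred (pats : List String) (line : String) : Bool :=
  pats.any (fun q => PySem.Str.isIn q (PySem.Str.lower line))

theorem matchesAny_lower (line : String) (pats : List String) :
    matchesAny (PySem.Str.lower line) pats = catPred pats line := by
  unfold matchesAny catPred
  rw [lower_idem]

-- the loop invariant: A's fold over a literal six-key dict, counts generalized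
theorem loop_eq (lines : List String) (n1 n2 n3 n4 n5 : Int) :
    lines.foldl incidentStep
      (PySem.Dict.mk [("crashloop", n1), ("imagepull", n2), ("pending", n3),
                      ("service_unreachable", n4), ("oom", n5), ("generic", 0)]) =
      PySem.Dict.mk [("crashloop", n1 + lines.countP (catPred pvCrashloopPatterns)),
                     ("imagepull", n2 + lines.countP (catPred pvImagepullPatterns)),
                     ("pending", n3 + lines.countP (catPred pvPendingPatterns)),
                     ("service_unreachable", n4 + lines.countP (catPred pvServicePatterns)),
                     ("oom", n5 + lines.countP (catPred pvOomPatterns)),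
                     ("generic", 0)] := by
  induction lines generalizing n1 n2 n3 n4 n5 with
  | nil => simp
  | cons l ls ih =>
    rw [List.foldl_cons]
    have hstep : incidentStep
        (PySem.Dict.mk [("crashloop", n1), ("imagepull", n2), ("pending", n3),
                        ("service_unreachable", n4), ("oom", n5), ("generic", 0)]) l =
        PySem.Dict.mk [("crashloop", n1 + if catPred pvCrashloopPatterns l then 1 else 0),
                       ("imagepull", n2 + if catPred pvImagepullPatterns l then 1 else 0),
                       ("pending", n3 + if catPred pvPendingPatterns l then 1 else 0),
                       ("service_unreachable", n4 + if catPred pvServicePatterns l then 1 else 0),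
                       ("oom", n5 + if catPred pvOomPatterns l then 1 else 0),
                       ("generic", 0)] := by
      unfold incidentStep
      simp only [matchesAny_lower]
      split_ifs <;>
        simp [PySem.Dict.modify, PySem.Dict.insert, PySem.Dict.getD, PySem.Dict.get?,
              PySem.Dict.contains]
    rw [hstep, ih]
    simp [List.countP_cons]
    constructor <;> [skip; constructor] <;> [skip; skip; constructor] <;>
      [skip; skip; skip; constructor] <;> split_ifs <;> omega

-- ===== VERDICT (by name: the statement is the Claim_ definition above) =====
theorem incident_signal_counts_py_spec : Claim_equal_incident_signal_counts_py := by
  intro lines _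
  unfold Spec_incident_signal_counts_py incident_signal_counts_py incident_signal_counts_py_alt
  have hinit : pvIncidentTypes.foldl (fun d name => d.insert name 0) PySem.Dict.empty =
      PySem.Dict.mk [("crashloop", (0:Int)), ("imagepull", 0), ("pending", 0),
                     ("service_unreachable", 0), ("oom", 0), ("generic", 0)] := by decide
  simp only [hinit, loop_eq]
  have hcnt : ∀ pats : List String,
      (lines.map PySem.Str.lower).countP (fun text => pats.any fun q => PySem.Str.isIn q text) =
        lines.countP (catPred pats) := by
    intro pats
    rw [List.countP_map]
    rfl
  have h0 : lines.countP (catPred []) = 0 := by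
    simp [List.countP_eq_zero, catPred]
  simp only [pvCategoryPatterns, List.map_cons, List.map_nil, hcnt, h0]
  simp
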